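-- pv_equiv track=rewrite | github.com/Karvsky/P-Cmax-algorithm | simulated_annealing.py | generuj_rozwiazanie_poczatkowe
-- ===== SOURCE A (Python) =====
-- def generuj_rozwiazanie_poczatkowe(czasy, procesory):
--     """
--     Tworzy rozwiązanie początkowe używając tej samej logiki, co Twój
--     oryginalny algorytm (List Scheduling).
--     Zwraca listę, gdzie indeks to zadanie, a wartość to maszyna.
--     """
--     liczba_zadan = len(czasy)
--     przydzial = [0] * liczba_zadan  # Lista: przydzial[i] = maszyna dla zadania i
--     obciazenie_procesorow = [0] * procesory
--
--     # Implementacja logiki z Twojego pliku przydzial_procesow.py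
--     # Pierwsze 'procesory' zadań na osobne maszyny
--     for i in range(min(procesory, liczba_zadan)):
--         przydzial[i] = i
--         obciazenie_procesorow[i] = czasy[i]
--
--     # Pozostałe zadania na maszynę z najmniejszym obciążeniem
--     for i in range(procesory, liczba_zadan):
--         idx_min_obciazenia = obciazenie_procesorow.index(min(obciazenie_procesorow))
--         przydzial[i] = idx_min_obciazenia
--         obciazenie_procesorow[idx_min_obciazenia] += czasy[i]
--
--     return przydzial
-- ===== SOURCE B (Python) =====
-- def generuj_rozwiazanie_poczatkowe(czasy, procesory):
--     n = len(czasy)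
--     if n <= procesory:
--         # at most one task per machine: task i goes to machine i
--         return list(range(n))
--     przydzial = list(range(procesory)) + [0] * (n - procesory)
--     # sorted list of (load, machine) pairs: head is always the least-loaded machine
--     # (smallest load, ties by smallest machine index)
--     pary = sorted((czasy[j], j) for j in range(procesory))
--     for i in range(procesory, n):
--         obc, m = pary.pop(0)
--         przydzial[i] = m
--         nowy = (obc + czasy[i], m)
--         # binary search for the insertion point keeping pary sorted
--         lo, hi = 0, len(pary)
--         while lo < hi:
--             mid = (lo + hi) // 2
--             e = pary[mid]
--             if e[0] < nowy[0] or (e[0] == nowy[0] and e[1] < nowy[1]):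
--                 lo = mid + 1
--             else:
--                 hi = mid
--         pary.insert(lo, nowy)
--     return przydzial
-- ===== Notes on version B (the rewrite author's own statement) =====
-- stated objective: faster
-- what changed: A rescans the whole load array (min then list.index) in Python for every task; B keeps one lexicographically sorted list of (load, machine) pairs, so the least-loaded machine (ties by smallest index) is the head, re-insertion uses hand-written binary search, and the machines>=tasks case returns list(range(n)) directly.
import Mathlib
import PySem

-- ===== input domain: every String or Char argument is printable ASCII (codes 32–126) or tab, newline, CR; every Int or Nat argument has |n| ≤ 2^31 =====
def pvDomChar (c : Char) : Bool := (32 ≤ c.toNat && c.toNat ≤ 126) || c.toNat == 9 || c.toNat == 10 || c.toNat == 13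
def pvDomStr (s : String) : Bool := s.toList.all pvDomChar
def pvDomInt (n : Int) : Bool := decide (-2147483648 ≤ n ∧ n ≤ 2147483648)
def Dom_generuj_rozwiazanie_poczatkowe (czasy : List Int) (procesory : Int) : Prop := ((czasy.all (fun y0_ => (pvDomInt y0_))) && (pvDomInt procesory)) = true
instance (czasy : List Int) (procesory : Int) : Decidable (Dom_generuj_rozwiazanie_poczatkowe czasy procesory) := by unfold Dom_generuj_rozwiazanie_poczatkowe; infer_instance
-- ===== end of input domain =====

-- B replaces A's per-task rescan (min + list.index over the loads) by one sorted list of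
-- (load, machine) pairs: the head is always the least-loaded machine and re-insertion uses
-- binary search (alternative structure; measurably faster in Python on large inputs).



-- ===== PORT A =====
def generuj_rozwiazanie_poczatkowe (czasy : List Int) (procesory : Int) : List Int :=
  let liczba_zadan : Int := czasy.length
  let przydzial : List Int := List.replicate czasy.length 0
  let obciazenie : List Int := List.replicate procesory.toNat 0
  let st1 := (PySem.List.pyRange 0 (min procesory liczba_zadan) 1).foldl
    (fun (st : List Int × List Int) i =>
      (st.1.set i.toNat i, st.2.set i.toNat ((PySem.List.pyGet? czasy i).getD 0)))
    (przydzial, obciazenie)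
  let st2 := (PySem.List.pyRange procesory liczba_zadan 1).foldl
    (fun (st : List Int × List Int) i =>
      let idx : Nat := (PySem.List.index? st.2 ((PySem.List.min? st.2 (fun x => x)).getD 0)).getD 0
      (st.1.set i.toNat (idx : Int), st.2.set idx (st.2.getD idx 0 + (PySem.List.pyGet? czasy i).getD 0)))
    st1
  st2.1

-- ===== PORT B =====
-- Source B's hand-written binary search for the insertion point (lo, hi ≥ 0 throughout)
def pvBisect (pary : List (Int × Int)) (nowy : Int × Int) (lo hi : Int) : Int :=
  if _h : lo < hi then
    -- mid = (lo + hi) // 2 ; e = pary[mid]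
    if ((PySem.List.pyGet? pary (PySem.Int.floordiv (lo + hi) 2)).getD (0, 0)).1 < nowy.1 ∨
        (((PySem.List.pyGet? pary (PySem.Int.floordiv (lo + hi) 2)).getD (0, 0)).1 = nowy.1 ∧
         ((PySem.List.pyGet? pary (PySem.Int.floordiv (lo + hi) 2)).getD (0, 0)).2 < nowy.2) then
      pvBisect pary nowy (PySem.Int.floordiv (lo + hi) 2 + 1) hi
    else pvBisect pary nowy lo (PySem.Int.floordiv (lo + hi) 2)
  else lo
termination_by (hi - lo).toNat
decreasing_by
  · have hm : PySem.Int.floordiv (lo + hi) 2 = (lo + hi) / 2 :=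
      PySem.Int.floordiv_eq_ediv_of_pos (by omega)
    simp only [hm]; omega
  · have hm : PySem.Int.floordiv (lo + hi) 2 = (lo + hi) / 2 :=
      PySem.Int.floordiv_eq_ediv_of_pos (by omega)
    simp only [hm]; omega

def generuj_rozwiazanie_poczatkowe_alt (czasy : List Int) (procesory : Int) : List Int :=
  let n : Int := czasy.length
  if n ≤ procesory then
    PySem.List.pyRange 0 n 1
  else
    let przydzial0 : List Int :=
      PySem.List.pyRange 0 procesory 1 ++ List.replicate (n - procesory).toNat 0
    let pary0 : List (Int × Int) :=
      PySem.List.sorted2 ((PySem.List.pyRange 0 procesory 1).map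
        (fun j => ((PySem.List.pyGet? czasy j).getD 0, j))) Prod.fst Prod.snd
    let st := (PySem.List.pyRange procesory n 1).foldl
      (fun (st : List Int × List (Int × Int)) i =>
        let h := st.2.headD (0, 0)
        let rest := st.2.tail
        let nowy := (h.1 + (PySem.List.pyGet? czasy i).getD 0, h.2)
        (st.1.set i.toNat h.2,
         PySem.List.insert rest (pvBisect rest nowy 0 (rest.length : Int)) nowy))
      (przydzial0, pary0)
    st.1

-- ===== PRECONDITION & SPEC =====
-- Pre_ excludes exactly the inputs where A raises: for procesory ≤ 0 with a nonempty second
-- loop A calls min([]) (ValueError); B raises there too (pop from an empty list).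
def Pre_generuj_rozwiazanie_poczatkowe (czasy : List Int) (procesory : Int) : Prop :=
  1 ≤ procesory ∨ (procesory = 0 ∧ czasy = [])
instance (czasy : List Int) (procesory : Int) : Decidable (Pre_generuj_rozwiazanie_poczatkowe czasy procesory) := by unfold Pre_generuj_rozwiazanie_poczatkowe; infer_instance

def pvWitness_generuj_rozwiazanie_poczatkowe : List Int × Int := ([3, 1, 4, 1, 5], 2)

def Spec_generuj_rozwiazanie_poczatkowe (czasy : List Int) (procesory : Int) (out : List Int) : Prop := out = generuj_rozwiazanie_poczatkowe_alt czasy procesory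
instance (czasy : List Int) (procesory : Int) (out : List Int) : Decidable (Spec_generuj_rozwiazanie_poczatkowe czasy procesory out) := by unfold Spec_generuj_rozwiazanie_poczatkowe; infer_instance

-- ===== CLAIM (what is proved, stated in full; the proofs are below) =====
def Claim_equal_generuj_rozwiazanie_poczatkowe : Prop := ∀ (czasy : List Int) (procesory : Int), Dom_generuj_rozwiazanie_poczatkowe czasy procesory → Pre_generuj_rozwiazanie_poczatkowe czasy procesory → Spec_generuj_rozwiazanie_poczatkowe czasy procesory (generuj_rozwiazanie_poczatkowe czasy procesory)

-- ===== LEMMAS AND PROOFS =====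
-- linear sorted insertion (the specification the binary-search insert is proved equal to)
def pvLt (a b : Int × Int) : Bool := a.1 < b.1 || (a.1 == b.1 && a.2 < b.2)

def pvWstaw : List (Int × Int) → (Int × Int) → List (Int × Int)
  | [], x => [x]
  | p :: r, x => if pvLt p x then p :: pvWstaw r x else x :: p :: r

lemma pvLt_true_iff (a b : Int × Int) : pvLt a b = true ↔ (a.1 < b.1 ∨ (a.1 = b.1 ∧ a.2 < b.2)) := by
  simp [pvLt]

lemma pvLt_false_iff (a b : Int × Int) : pvLt a b = false ↔ (b.1 < a.1 ∨ (b.1 = a.1 ∧ b.2 ≤ a.2)) := by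
  rcases a with ⟨a1, a2⟩; rcases b with ⟨b1, b2⟩
  simp [pvLt]; omega

lemma pvWstaw_perm (l : List (Int × Int)) (x : Int × Int) : (pvWstaw l x).Perm (x :: l) := by
  induction l with
  | nil => simp [pvWstaw]
  | cons p r ih =>
    simp only [pvWstaw]
    split
    · exact (ih.cons p).trans (List.Perm.swap x p r)
    · exact List.Perm.refl _

lemma mem_pvWstaw {q : Int × Int} {l : List (Int × Int)} {x : Int × Int} :
    q ∈ pvWstaw l x ↔ q = x ∨ q ∈ l := by
  rw [(pvWstaw_perm l x).mem_iff]; simp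

lemma pvWstaw_sorted (l : List (Int × Int)) (x : Int × Int)
    (h : l.Pairwise (fun a b => pvLt b a = false)) :
    (pvWstaw l x).Pairwise (fun a b => pvLt b a = false) := by
  induction l with
  | nil => simp [pvWstaw]
  | cons p r ih =>
    rcases List.pairwise_cons.mp h with ⟨hp, hr⟩
    simp only [pvWstaw]
    split
    · next hpx =>
      refine List.pairwise_cons.mpr ⟨?_, ih hr⟩
      intro q hq
      rcases mem_pvWstaw.mp hq with rfl | hq'
      · rw [pvLt_false_iff]; rw [pvLt_true_iff] at hpx
        rcases p with ⟨p1,p2⟩; rcases q with ⟨q1,q2⟩; simp_all; omega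
      · exact hp q hq'
    · next hpx =>
      replace hpx : pvLt p x = false := by simpa using hpx
      refine List.pairwise_cons.mpr ⟨?_, h⟩
      intro q hq
      rcases List.mem_cons.mp hq with rfl | hq'
      · exact hpx
      · have h1 := hp q hq'
        rw [pvLt_false_iff] at *
        rcases p with ⟨p1,p2⟩; rcases q with ⟨q1,q2⟩; rcases x with ⟨x1,x2⟩
        simp_all; omega

structure pvInv (m : Nat) (obc : List Int) (pary : List (Int × Int)) : Prop where
  hlen : obc.length = m
  hplen : pary.length = m
  hsort : pary.Pairwise (fun a b => pvLt b a = false)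
  hval : ∀ q ∈ pary, 0 ≤ q.2 ∧ q.2.toNat < m ∧ obc.getD q.2.toNat 0 = q.1
  hnd : (pary.map Prod.snd).Nodup
  hcov : ∀ j : Nat, j < m → (j : Int) ∈ pary.map Prod.snd

lemma pvGetD_set_self (l : List Int) (i : Nat) (v d : Int) (h : i < l.length) :
    (l.set i v).getD i d = v := by
  rw [List.getD_eq_getElem _ d (by simpa using h)]
  simp [List.getElem_set_self]

lemma pvGetD_set_ne (l : List Int) (i j : Nat) (v d : Int) (h : i ≠ j) :
    (l.set i v).getD j d = l.getD j d := by
  simp [List.getD_eq_getElem?_getD, List.getElem?_set_ne h]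

lemma pvStep (m : Nat) (obc : List Int) (h : Int × Int) (t : List (Int × Int))
    (inv : pvInv m obc (h :: t)) (c : Int) :
    ((PySem.List.index? obc ((PySem.List.min? obc (fun x => x)).getD 0)).getD 0 = h.2.toNat)
    ∧ (((PySem.List.index? obc ((PySem.List.min? obc (fun x => x)).getD 0)).getD 0 : Int) = h.2)
    ∧ (obc.getD ((PySem.List.index? obc ((PySem.List.min? obc (fun x => x)).getD 0)).getD 0) 0 = h.1)
    ∧ pvInv m (obc.set h.2.toNat (h.1 + c)) (pvWstaw t (h.1 + c, h.2)) := by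
  obtain ⟨hlen, hplen, hsort, hval, hnd, hcov⟩ := inv
  have hm : 0 < m := by rw [← hplen]; simp
  obtain ⟨hh2, hh2m, hhval⟩ := hval h (List.mem_cons_self)
  have hmemh1 : h.1 ∈ obc := by
    rw [← hhval, List.getD_eq_getElem _ _ (by omega)]
    exact List.getElem_mem _
  -- h.1 is the minimum value of obc
  have hmin : ∀ x ∈ obc, h.1 ≤ x := by
    intro x hx
    obtain ⟨j, hj, hxj⟩ := List.mem_iff_getElem.mp hx
    obtain ⟨q, hq, hq2⟩ := List.mem_map.mp (hcov j (by omega))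
    have hqv := hval q hq
    have hq2n : q.2.toNat = j := by omega
    have hq1 : q.1 = x := by
      rw [← hqv.2.2, hq2n, List.getD_eq_getElem _ _ hj, hxj]
    rcases List.mem_cons.mp hq with rfl | hqt
    · omega
    · have := (List.pairwise_cons.mp hsort).1 q hqt
      rw [pvLt_false_iff] at this
      omega
  -- min(obc) = h.1
  have hv : (PySem.List.min? obc (fun x => x)).getD 0 = h.1 := by
    have hne : obc ≠ [] := by intro hh; rw [hh] at hlen; simp at hlen; omega
    obtain ⟨m0, hm0⟩ : ∃ m0, PySem.List.min? obc (fun x => x) = some m0 := by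
      cases hmo : PySem.List.min? obc (fun x => x) with
      | none => exact absurd ((PySem.List.min?_eq_none_iff _ _).mp hmo) hne
      | some m0 => exact ⟨m0, rfl⟩
    have h1 : m0 ∈ obc := PySem.List.min?_mem hm0
    have h2 := PySem.List.min?_isMin hm0
    rw [hm0]
    simp only [Option.getD_some]
    exact le_antisymm (h2 h.1 hmemh1) (hmin m0 h1)
  -- index(obc, h.1) = h.2.toNat
  have hidx : PySem.List.index? obc h.1 = some h.2.toNat := by
    obtain ⟨k, hk⟩ : ∃ k, PySem.List.index? obc h.1 = some k := by
      cases hio : PySem.List.index? obc h.1 with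
      | none => exact absurd hmemh1 ((PySem.List.index?_eq_none_iff _ _).mp hio)
      | some k => exact ⟨k, rfl⟩
    obtain ⟨hklen, hobck, hfirst⟩ := PySem.List.getElem_of_index?_eq_some hk
    have hk_le : k ≤ h.2.toNat := by
      by_contra hcon
      exact hfirst h.2.toNat (by omega)
        (by rw [← List.getD_eq_getElem _ (0:Int) (by omega)]; exact hhval)
    have hk_ge : ¬ k < h.2.toNat := by
      intro hcon
      obtain ⟨q, hq, hq2⟩ := List.mem_map.mp (hcov k (by omega))
      have hqv := hval q hq
      have hq1 : q.1 = h.1 := by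
        rw [← hqv.2.2]
        have : q.2.toNat = k := by omega
        rw [this, List.getD_eq_getElem _ _ hklen, hobck]
      have hqt : q ∈ t := by
        rcases List.mem_cons.mp hq with rfl | hqt
        · omega
        · exact hqt
      have := (List.pairwise_cons.mp hsort).1 q hqt
      rw [pvLt_false_iff] at this
      omega
    have : k = h.2.toNat := by omega
    rw [hk, this]
  have hmain : (PySem.List.index? obc ((PySem.List.min? obc (fun x => x)).getD 0)).getD 0 = h.2.toNat := by
    rw [hv, hidx]; rfl
  have hsndnd : h.2 ∉ t.map Prod.snd := by
    have := hnd; simp only [List.map_cons, List.nodup_cons] at this; exact this.1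
  refine ⟨hmain, by rw [hmain]; omega, by rw [hmain]; exact hhval, ?_⟩
  constructor
  · simpa using hlen
  · rw [(pvWstaw_perm t _).length_eq]; simpa using hplen
  · exact pvWstaw_sorted _ _ (List.pairwise_cons.mp hsort).2
  · intro q hq
    rcases mem_pvWstaw.mp hq with rfl | hqt
    · refine ⟨by simpa using hh2, by simpa using hh2m, ?_⟩
      exact pvGetD_set_self _ _ _ _ (by omega)
    · obtain ⟨hq2, hq2m, hqval⟩ := hval q (List.mem_cons_of_mem _ hqt)
      have hne2 : q.2 ≠ h.2 := by
        intro he; exact hsndnd (he ▸ List.mem_map_of_mem hqt)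
      refine ⟨hq2, hq2m, ?_⟩
      rw [pvGetD_set_ne _ _ _ _ _ (by omega)]
      exact hqval
  · have hp : ((pvWstaw t (h.1 + c, h.2)).map Prod.snd).Perm ((h :: t).map Prod.snd) := by
      have := (pvWstaw_perm t (h.1 + c, h.2)).map Prod.snd
      simpa using this
    exact hp.nodup_iff.mpr hnd
  · intro j hj
    have hp : ((pvWstaw t (h.1 + c, h.2)).map Prod.snd).Perm ((h :: t).map Prod.snd) := by
      have := (pvWstaw_perm t (h.1 + c, h.2)).map Prod.snd
      simpa using this
    exact hp.mem_iff.mpr (hcov j hj)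

lemma pvFoldl_fst {α β γ : Type} (L : List γ) (f : α → γ → α) (g : α × β → γ → β) :
    ∀ (a : α) (b : β), (L.foldl (fun st i => (f st.1 i, g st i)) (a, b)).1 = L.foldl f a := by
  induction L with
  | nil => intro a b; rfl
  | cons x L ih => intro a b; simp only [List.foldl_cons]; exact ih _ _

lemma pvFoldl_snd {α β γ : Type} (L : List γ) (f : α × β → γ → α) (g : β → γ → β) :
    ∀ (a : α) (b : β), (L.foldl (fun st i => (f st i, g st.2 i)) (a, b)).2 = L.foldl g b := by
  induction L with
  | nil => intro a b; rfl
  | cons x L ih => intro a b; simp only [List.foldl_cons]; exact ih _ _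

lemma pvLength_foldl_set (L : List Int) (v : Int → Int) :
    ∀ (base : List Int), (L.foldl (fun o i => o.set i.toNat (v i)) base).length = base.length := by
  induction L with
  | nil => intro base; rfl
  | cons x L ih => intro base; simp only [List.foldl_cons]; rw [ih]; simp

lemma pvInit_obc_getD (v : Int → Int) (base : List Int) :
    ∀ (K : Nat), K ≤ base.length → ∀ (t : Nat), t < base.length →
    ((PySem.List.pyRange 0 K 1).foldl (fun o i => o.set i.toNat (v i)) base).getD t 0
    = if t < K then v (t : Int) else base.getD t 0 := by
  intro K
  induction K with
  | zero => intro _ t _; rw [PySem.List.pyRange_one_eq_nil (by omega)]; simp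
  | succ K ih =>
    intro hK t ht
    have hcast : ((K + 1 : Nat) : Int) = (K : Int) + 1 := by push_cast; ring
    rw [hcast, PySem.List.pyRange_one_succ_right (by omega), List.foldl_append]
    simp only [List.foldl_cons, List.foldl_nil]
    have hlen : ((PySem.List.pyRange 0 K 1).foldl (fun o i => o.set i.toNat (v i)) base).length = base.length :=
      pvLength_foldl_set _ _ _
    by_cases hEq : t = K
    · subst hEq
      rw [show ((t : Int)).toNat = t by omega]
      rw [pvGetD_set_self _ _ _ _ (by omega)]
      simp
    · rw [show ((K : Int)).toNat = K by omega]
      rw [pvGetD_set_ne _ _ _ _ _ (by omega)]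
      rw [ih (by omega) t ht]
      have : (t < K + 1) = (t < K) := by
        apply propext; constructor <;> intro <;> omega
      split_ifs with h1 h2 h2 <;> try rfl
      · omega
      · omega

lemma pvFoldl_wstaw_perm (f : Int → Int × Int) :
    ∀ (L : List Int) (init : List (Int × Int)),
    (L.foldl (fun acc j => pvWstaw acc (f j)) init).Perm (init ++ L.map f) := by
  intro L
  induction L with
  | nil => intro init; simp
  | cons a L ih =>
    intro init
    simp only [List.foldl_cons, List.map_cons]
    refine (ih _).trans ?_
    refine (List.Perm.append_right _ (pvWstaw_perm init (f a))).trans ?_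
    exact List.perm_middle.symm

lemma pvFoldl_wstaw_sorted (f : Int → Int × Int) :
    ∀ (L : List Int) (init : List (Int × Int)),
    init.Pairwise (fun a b => pvLt b a = false) →
    (L.foldl (fun acc j => pvWstaw acc (f j)) init).Pairwise (fun a b => pvLt b a = false) := by
  intro L
  induction L with
  | nil => intro init h; exact h
  | cons a L ih =>
    intro init h
    simp only [List.foldl_cons]
    exact ih _ (pvWstaw_sorted _ _ h)

-- the initial sorted pair list satisfies the invariant w.r.t. A's initial load array
lemma pvInit_inv (czasy : List Int) (procesory : Int) (hp : 1 ≤ procesory) :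
    pvInv procesory.toNat
      ((PySem.List.pyRange 0 (min procesory (czasy.length : Int)) 1).foldl
        (fun o i => o.set i.toNat ((PySem.List.pyGet? czasy i).getD 0))
        (List.replicate procesory.toNat 0))
      ((PySem.List.pyRange 0 procesory 1).foldl
        (fun acc j => pvWstaw acc
          (if j < min procesory (czasy.length : Int) then (PySem.List.pyGet? czasy j).getD 0 else 0, j)) []) := by
  set n : Int := (czasy.length : Int) with hn
  set k : Int := min procesory n with hkdef
  have hk0 : 0 ≤ k := by simp [hkdef]; omega
  have hkm : k ≤ procesory := by simp [hkdef]
  set f : Int → Int × Int := fun j => (if j < k then (PySem.List.pyGet? czasy j).getD 0 else 0, j) with hf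
  set obc := ((PySem.List.pyRange 0 k 1).foldl
        (fun o i => o.set i.toNat ((PySem.List.pyGet? czasy i).getD 0))
        (List.replicate procesory.toNat 0)) with hobc
  set pary := ((PySem.List.pyRange 0 procesory 1).foldl (fun acc j => pvWstaw acc (f j)) []) with hpary
  have hKcast : ((k.toNat : Nat) : Int) = k := by omega
  have hlenobc : obc.length = procesory.toNat := by
    rw [hobc, pvLength_foldl_set]; simp
  have hperm : pary.Perm ((PySem.List.pyRange 0 procesory 1).map f) := by
    have := pvFoldl_wstaw_perm f (PySem.List.pyRange 0 procesory 1) []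
    simpa using this
  have hgetD : ∀ t : Nat, t < procesory.toNat →
      obc.getD t 0 = if (t : Int) < k then (PySem.List.pyGet? czasy (t : Int)).getD 0 else 0 := by
    intro t ht
    rw [hobc, ← hKcast]
    rw [pvInit_obc_getD _ _ k.toNat (by simp; omega) t (by simp; omega)]
    have h1 : (t < k.toNat) = ((t:Int) < k) := by
      apply propext; constructor <;> intro <;> omega
    split_ifs with a b b <;> try rfl
    · omega
    · omega
    · simp
  constructor
  · exact hlenobc
  · rw [hperm.length_eq]; simp
  · exact pvFoldl_wstaw_sorted f _ _ (by simp)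
  · intro q hq
    rw [hperm.mem_iff] at hq
    obtain ⟨j, hj, rfl⟩ := List.mem_map.mp hq
    rw [PySem.List.mem_pyRange_one] at hj
    have hq2 : (f j).2 = j := by simp [hf]
    refine ⟨by rw [hq2]; omega, by rw [hq2]; omega, ?_⟩
    rw [hq2, hgetD j.toNat (by omega)]
    have hjj : ((j.toNat : Nat) : Int) = j := by omega
    rw [hjj]
  · have : (pary.map Prod.snd).Perm ((PySem.List.pyRange 0 procesory 1).map (fun j => (f j).2)) := by
      have := hperm.map Prod.snd
      simpa [Function.comp] using this
    have h2 : ((PySem.List.pyRange 0 procesory 1).map (fun j => (f j).2)) = PySem.List.pyRange 0 procesory 1 := by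
      simp [hf]
    rw [h2] at this
    exact this.nodup_iff.mpr (PySem.List.nodup_pyRange_one _ _)
  · intro j hj
    have hmem : f (j : Int) ∈ pary := by
      rw [hperm.mem_iff]
      exact List.mem_map_of_mem (by rw [PySem.List.mem_pyRange_one]; omega)
    have : (f (j : Int)).2 = (j : Int) := by simp [hf]
    rw [← this]
    exact List.mem_map_of_mem hmem

-- takeWhile characterisation
lemma pvTw_true {p : Int × Int → Bool} {l : List (Int × Int)} {i : Nat}
    (hi : i < (l.takeWhile p).length) (hil : i < l.length) : p (l[i]) = true := by
  have hpre := List.takeWhile_prefix (l := l) (p := p)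
  have : (l.takeWhile p)[i] = l[i] := List.IsPrefix.getElem hpre hi
  rw [← this]
  exact List.mem_takeWhile_imp (List.getElem_mem _)

lemma pvTw_false_at {p : Int × Int → Bool} :
    ∀ (l : List (Int × Int)), (h : (l.takeWhile p).length < l.length) →
    p (l[(l.takeWhile p).length]) = false := by
  intro l
  induction l with
  | nil => intro h; simp at h
  | cons a t ih =>
    intro h
    cases hp : p a with
    | true =>
      have h' : (List.takeWhile p t).length < t.length := by
        simpa [List.takeWhile_cons, hp] using h
      simpa [List.takeWhile_cons, hp] using ih h'
    | false =>
      simp [hp]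

lemma pvLt_trans_le (a b x : Int × Int) (h1 : pvLt b a = false) (h2 : pvLt b x = true) :
    pvLt a x = true := by
  rw [pvLt_false_iff] at h1; rw [pvLt_true_iff] at h2 ⊢; omega

-- on a sorted list, pvLt l[i] x holds exactly on the takeWhile prefix
lemma pvSorted_char {l : List (Int × Int)} {x : Int × Int}
    (hs : l.Pairwise (fun a b => pvLt b a = false)) {i : Nat} (hi : i < l.length) :
    (pvLt (l[i]) x = true ↔ i < (l.takeWhile (fun e => pvLt e x)).length) := by
  constructor
  · intro ht
    by_contra hcon
    push Not at hcon
    have hc : (l.takeWhile (fun e => pvLt e x)).length < l.length := by omega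
    have hfalse := pvTw_false_at l hc
    have hmono : pvLt (l[(l.takeWhile (fun e => pvLt e x)).length]) x = true := by
      rcases Nat.eq_or_lt_of_le hcon with he | hlt
      · subst he; exact ht
      · have := (List.pairwise_iff_getElem.mp hs) _ _ hc hi hlt
        exact pvLt_trans_le _ _ _ this ht
    rw [hmono] at hfalse; exact absurd hfalse (by simp)
  · intro hlt
    exact pvTw_true hlt hi

lemma pvBisect_eq_aux (l : List (Int × Int)) (x : Int × Int)
    (hs : l.Pairwise (fun a b => pvLt b a = false)) :
    ∀ (fuel : Nat) (lo hi : Int), (hi - lo).toNat ≤ fuel → 0 ≤ lo →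
    lo ≤ ((l.takeWhile (fun e => pvLt e x)).length : Int) →
    ((l.takeWhile (fun e => pvLt e x)).length : Int) ≤ hi → hi ≤ (l.length : Int) →
    pvBisect l x lo hi = ((l.takeWhile (fun e => pvLt e x)).length : Int) := by
  intro fuel
  induction fuel with
  | zero =>
    intro lo hi hf h0 hlo hhi hlen
    rw [pvBisect]
    rw [dif_neg (by omega)]
    omega
  | succ fuel ih =>
    intro lo hi hf h0 hlo hhi hlen
    by_cases hlh : lo < hi
    · rw [pvBisect, dif_pos hlh]
      have hm : PySem.Int.floordiv (lo + hi) 2 = (lo + hi) / 2 :=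
        PySem.Int.floordiv_eq_ediv_of_pos (by omega)
      set mid := PySem.Int.floordiv (lo + hi) 2 with hmid
      have hmb : lo ≤ mid ∧ mid < hi := by omega
      have hmlen : mid.toNat < l.length := by omega
      have hget : (PySem.List.pyGet? l mid).getD (0,0) = l[mid.toNat] := by
        have h1 : mid = ((mid.toNat : Nat) : Int) := by omega
        conv_lhs => rw [h1, PySem.List.pyGet?_natCast]
        simp [hmlen]
      have hcond : ((PySem.List.pyGet? l mid).getD (0,0)).1 < x.1 ∨
          (((PySem.List.pyGet? l mid).getD (0,0)).1 = x.1 ∧ ((PySem.List.pyGet? l mid).getD (0,0)).2 < x.2)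
          ↔ mid.toNat < (l.takeWhile (fun e => pvLt e x)).length := by
        rw [hget, ← pvSorted_char hs hmlen, pvLt_true_iff]
      split_ifs with hc
      · have := hcond.mp hc
        exact ih (mid + 1) hi (by omega) (by omega) (by omega) hhi hlen
      · have : ¬ mid.toNat < (l.takeWhile (fun e => pvLt e x)).length := fun hh => hc (hcond.mpr hh)
        exact ih lo mid (by omega) h0 hlo (by omega) (by omega)
    · rw [pvBisect, dif_neg hlh]; omega

lemma pvWstaw_eq_take_drop (l : List (Int × Int)) (x : Int × Int) :
    pvWstaw l x = l.take (l.takeWhile (fun e => pvLt e x)).length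
      ++ x :: l.drop (l.takeWhile (fun e => pvLt e x)).length := by
  induction l with
  | nil => simp [pvWstaw]
  | cons p r ih =>
    cases hp : pvLt p x with
    | true => simp [pvWstaw, hp, ih]
    | false => simp [pvWstaw, hp]

lemma pvInsert_sorted_eq (l : List (Int × Int)) (x : Int × Int)
    (hs : l.Pairwise (fun a b => pvLt b a = false)) :
    PySem.List.insert l (pvBisect l x 0 (l.length : Int)) x = pvWstaw l x := by
  have hc : (l.takeWhile (fun e => pvLt e x)).length ≤ l.length :=
    List.IsPrefix.length_le (List.takeWhile_prefix _)
  have hb : pvBisect l x 0 (l.length : Int)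
      = ((l.takeWhile (fun e => pvLt e x)).length : Int) :=
    pvBisect_eq_aux l x hs l.length 0 (l.length : Int)
      (by omega) (by omega) (by omega) (by omega) (by omega)
  rw [hb, PySem.List.insert_natCast _ _ _ hc, pvWstaw_eq_take_drop]

-- Python's built-in sort of distinct pairs agrees with repeated sorted insertion
def pvLtS (a b : Int × Int) : Bool :=
  decide (a.1 < b.1) || (!decide (b.1 < a.1) && decide (a.2 < b.2))

lemma pvInsertBy_eq_wstaw (x : Int × Int) :
    ∀ (acc : List (Int × Int)), (∀ e ∈ acc, e.2 ≠ x.2) →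
    PySem.List.insertBy pvLtS x acc = pvWstaw acc x := by
  intro acc
  induction acc with
  | nil => intro _; simp [PySem.List.insertBy, pvWstaw]
  | cons y ys ih =>
    intro hd
    have hy2 : y.2 ≠ x.2 := hd y (by simp)
    have hcase : pvLtS x y = !pvLt y x := by
      rcases x with ⟨x1, x2⟩; rcases y with ⟨y1, y2⟩
      have hne : y2 ≠ x2 := by simpa using hy2
      cases h : pvLt (y1, y2) (x1, x2) with
      | true => simp only [Bool.not_true]; rw [pvLt_true_iff] at h; simp [pvLtS]; omega
      | false => simp only [Bool.not_false]; rw [pvLt_false_iff] at h; simp [pvLtS]; omega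
    simp only [PySem.List.insertBy, pvWstaw, hcase]
    cases hl : pvLt y x with
    | true => simp [ih (fun e he => hd e (by simp [he]))]
    | false => simp

lemma pvFoldl_insertBy_eq (L : List (Int × Int)) :
    ∀ (acc : List (Int × Int)), (((acc ++ L).map Prod.snd).Nodup) →
    L.foldl (fun acc x => PySem.List.insertBy pvLtS x acc) acc
    = L.foldl (fun acc x => pvWstaw acc x) acc := by
  induction L with
  | nil => intro acc _; rfl
  | cons x L ih =>
    intro acc hnd
    have hdist : ∀ e ∈ acc, e.2 ≠ x.2 := by
      intro e he heq
      have h1 : ((acc.map Prod.snd) ++ ((x :: L).map Prod.snd)).Nodup := by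
        rw [← List.map_append]; exact hnd
      have hdisj := List.disjoint_of_nodup_append h1
      exact hdisj (List.mem_map_of_mem he) (by rw [heq]; simp)
    simp only [List.foldl_cons, pvInsertBy_eq_wstaw x acc hdist]
    apply ih
    have hperm : ((pvWstaw acc x ++ L).map Prod.snd).Perm (((acc ++ x :: L)).map Prod.snd) := by
      apply List.Perm.map
      exact (List.Perm.append_right L (pvWstaw_perm acc x)).trans List.perm_middle.symm
    exact hperm.nodup_iff.mpr hnd

-- closed form of the first loop's machine list
lemma pvPrzydzial_closed (N K : Nat) (hK : K ≤ N) :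
    ((PySem.List.pyRange 0 (K : Int) 1).foldl (fun (a : List Int) i => a.set i.toNat i)
      (List.replicate N (0 : Int)))
    = PySem.List.pyRange 0 (K : Int) 1 ++ List.replicate (N - K) 0 := by
  apply List.ext_getElem
  · rw [pvLength_foldl_set]
    simp [PySem.List.length_pyRange_one]
    omega
  · intro t h1 h2
    have hlen : ((PySem.List.pyRange 0 (K : Int) 1).foldl (fun (a : List Int) i => a.set i.toNat i)
        (List.replicate N (0 : Int))).length = N := by rw [pvLength_foldl_set]; simp
    have htN : t < N := by rw [hlen] at h1; exact h1
    rw [← List.getD_eq_getElem _ (0 : Int) h1, ← List.getD_eq_getElem _ (0 : Int) h2]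
    rw [pvInit_obc_getD (fun i => i) _ K (by simp; omega) t (by simp [htN])]
    have hKlen : (PySem.List.pyRange 0 (K : Int) 1).length = K := by
      simp [PySem.List.length_pyRange_one]
    by_cases ht : t < K
    · rw [if_pos ht]
      rw [List.getD_append _ _ _ _ (by omega)]
      rw [List.getD_eq_getElem _ _ (by omega)]
      rw [PySem.List.getElem_pyRange_one]
      omega
    · rw [if_neg ht]
      rw [List.getD_append_right _ _ _ _ (by omega)]
      rw [hKlen, List.getD_eq_getElem _ _ (by simp; omega)]
      simp

lemma pvLoop2 (czasy : List Int) (m : Nat) (hm : 0 < m) (L : List Int) :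
    ∀ (pA : List Int) (obc : List Int) (pary : List (Int × Int)), pvInv m obc pary →
    (L.foldl (fun (st : List Int × List Int) i =>
        (st.1.set i.toNat (((PySem.List.index? st.2 ((PySem.List.min? st.2 (fun x => x)).getD 0)).getD 0 : Nat) : Int),
         st.2.set ((PySem.List.index? st.2 ((PySem.List.min? st.2 (fun x => x)).getD 0)).getD 0)
           (st.2.getD ((PySem.List.index? st.2 ((PySem.List.min? st.2 (fun x => x)).getD 0)).getD 0) 0
             + (PySem.List.pyGet? czasy i).getD 0)))
       (pA, obc)).1
    = (L.foldl (fun (st : List Int × List (Int × Int)) i =>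
        (st.1.set i.toNat (st.2.headD (0, 0)).2,
         PySem.List.insert st.2.tail
           (pvBisect st.2.tail
             ((st.2.headD (0, 0)).1 + (PySem.List.pyGet? czasy i).getD 0, (st.2.headD (0, 0)).2)
             0 (st.2.tail.length : Int))
           ((st.2.headD (0, 0)).1 + (PySem.List.pyGet? czasy i).getD 0, (st.2.headD (0, 0)).2)))
       (pA, pary)).1 := by
  induction L with
  | nil => intro pA obc pary _; rfl
  | cons i L ih =>
    intro pA obc pary inv
    obtain ⟨h, t, rfl⟩ : ∃ h t, pary = h :: t := by
      cases pary with
      | nil => exfalso; have := inv.hplen; simp at this; omega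
      | cons h t => exact ⟨h, t, rfl⟩
    obtain ⟨h1, h2, h3, inv'⟩ := pvStep m obc h t inv ((PySem.List.pyGet? czasy i).getD 0)
    simp only [List.foldl_cons]
    have hst : t.Pairwise (fun a b => pvLt b a = false) := (List.pairwise_cons.mp inv.hsort).2
    have hins := pvInsert_sorted_eq t (h.1 + (PySem.List.pyGet? czasy i).getD 0, h.2) hst
    simp only [List.tail_cons, List.headD_cons]
    rw [hins]
    rw [show (pA.set i.toNat (((PySem.List.index? obc ((PySem.List.min? obc (fun x => x)).getD 0)).getD 0 : Nat) : Int),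
         obc.set ((PySem.List.index? obc ((PySem.List.min? obc (fun x => x)).getD 0)).getD 0)
           (obc.getD ((PySem.List.index? obc ((PySem.List.min? obc (fun x => x)).getD 0)).getD 0) 0
             + (PySem.List.pyGet? czasy i).getD 0))
        = (pA.set i.toNat h.2, obc.set h.2.toNat (h.1 + (PySem.List.pyGet? czasy i).getD 0)) from by
      rw [h1] at h2 h3; rw [h1, h2, h3]]
    exact ih _ _ _ inv'

lemma pvMain_eq (czasy : List Int) (procesory : Int)
    (hPre : 1 ≤ procesory ∨ (procesory = 0 ∧ czasy = [])) :
    generuj_rozwiazanie_poczatkowe czasy procesory = generuj_rozwiazanie_poczatkowe_alt czasy procesory := by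
  simp only [generuj_rozwiazanie_poczatkowe, generuj_rozwiazanie_poczatkowe_alt]
  by_cases hcase : (czasy.length : Int) ≤ procesory
  · -- n ≤ procesory: A's second loop is empty, result is 0,1,…,n-1
    rw [if_pos hcase]
    rw [PySem.List.pyRange_one_eq_nil hcase]
    simp only [List.foldl_nil]
    rw [min_eq_right hcase]
    rw [pvFoldl_fst _ (fun (a : List Int) (i : Int) => a.set i.toNat i)
      (fun (st : List Int × List Int) (i : Int) => st.2.set i.toNat ((PySem.List.pyGet? czasy i).getD 0)) _ _]
    have hN : ((czasy.length : Nat) : Int) = (czasy.length : Int) := rfl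
    have := pvPrzydzial_closed czasy.length czasy.length (le_refl _)
    simp only [Nat.sub_self, List.replicate_zero, List.append_nil] at this
    exact this
  · -- procesory < n: the invariant argument
    rw [if_neg hcase]
    have hp : 1 ≤ procesory := by
      rcases hPre with hp | ⟨h0, hc⟩
      · exact hp
      · exfalso; subst h0; subst hc; simp at hcase
    have hnp : procesory < (czasy.length : Int) := by omega
    have hmin : min procesory (czasy.length : Int) = procesory := min_eq_left (le_of_lt hnp)
    rw [hmin]
    -- split A's first loop into its two components
    have hst1 : ((PySem.List.pyRange 0 procesory 1).foldl
        (fun (st : List Int × List Int) i =>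
          (st.1.set i.toNat i, st.2.set i.toNat ((PySem.List.pyGet? czasy i).getD 0)))
        (List.replicate czasy.length 0, List.replicate procesory.toNat 0))
        = ((PySem.List.pyRange 0 procesory 1).foldl
            (fun (p : List Int) i => p.set i.toNat i) (List.replicate czasy.length 0),
           (PySem.List.pyRange 0 procesory 1).foldl
            (fun o i => o.set i.toNat ((PySem.List.pyGet? czasy i).getD 0)) (List.replicate procesory.toNat 0)) := by
      refine Prod.ext ?_ ?_
      · exact pvFoldl_fst _ (fun (a : List Int) (i : Int) => a.set i.toNat i)
          (fun (st : List Int × List Int) (i : Int) => st.2.set i.toNat ((PySem.List.pyGet? czasy i).getD 0)) _ _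
      · exact pvFoldl_snd _ (fun (st : List Int × List Int) (i : Int) => st.1.set i.toNat i)
          (fun (o : List Int) (i : Int) => o.set i.toNat ((PySem.List.pyGet? czasy i).getD 0)) _ _
    rw [hst1]
    -- A's machine-number prefix equals B's literal one
    have hpcast : ((procesory.toNat : Nat) : Int) = procesory := by omega
    have hprz : ((PySem.List.pyRange 0 procesory 1).foldl
        (fun (p : List Int) i => p.set i.toNat i) (List.replicate czasy.length 0))
        = PySem.List.pyRange 0 procesory 1 ++ List.replicate ((czasy.length : Int) - procesory).toNat 0 := by
      have := pvPrzydzial_closed czasy.length procesory.toNat (by omega)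
      rw [hpcast] at this
      rw [this]
      congr 1
      congr 1
      omega
    rw [hprz]
    -- B's sorted pair list is the sorted-insertion fold of A's initial loads
    have inv0 := pvInit_inv czasy procesory hp
    rw [hmin] at inv0
    have hpary : PySem.List.sorted2 ((PySem.List.pyRange 0 procesory 1).map
          (fun j => ((PySem.List.pyGet? czasy j).getD 0, j))) Prod.fst Prod.snd
        = ((PySem.List.pyRange 0 procesory 1).foldl
            (fun acc j => pvWstaw acc
              (if j < procesory then (PySem.List.pyGet? czasy j).getD 0 else 0, j)) []) := by
      have ha : PySem.List.sorted2 ((PySem.List.pyRange 0 procesory 1).map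
            (fun j => ((PySem.List.pyGet? czasy j).getD 0, j))) Prod.fst Prod.snd
          = ((PySem.List.pyRange 0 procesory 1).map
            (fun j => ((PySem.List.pyGet? czasy j).getD 0, j))).foldl
            (fun acc x => PySem.List.insertBy pvLtS x acc) [] := rfl
      have hnd : ((([] : List (Int × Int)) ++ (PySem.List.pyRange 0 procesory 1).map
            (fun j => ((PySem.List.pyGet? czasy j).getD 0, j))).map Prod.snd).Nodup := by
        simp only [List.nil_append, List.map_map]
        have : ((PySem.List.pyRange 0 procesory 1).map
            (Prod.snd ∘ fun j => ((PySem.List.pyGet? czasy j).getD 0, j)))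
            = PySem.List.pyRange 0 procesory 1 := by
          have hc : (Prod.snd ∘ fun j : Int => ((PySem.List.pyGet? czasy j).getD 0, j)) = fun j => j := by
            funext j; rfl
          rw [hc, List.map_id']
        rw [this]
        exact PySem.List.nodup_pyRange_one _ _
      rw [ha, pvFoldl_insertBy_eq _ _ hnd, List.foldl_map]
      refine PySem.List.foldl_congr_mem' _ _ _ _ ?_
      intro j hj acc
      rw [PySem.List.mem_pyRange_one] at hj
      rw [if_pos (by omega)]
    rw [hpary]
    exact pvLoop2 czasy procesory.toNat (by omega) _ _ _ _ inv0

-- ===== VERDICT (by name: the statement is the Claim_ definition above) =====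
theorem generuj_rozwiazanie_poczatkowe_spec : Claim_equal_generuj_rozwiazanie_poczatkowe := by
  intro czasy procesory hDom hPre
  unfold Spec_generuj_rozwiazanie_poczatkowe
  exact pvMain_eq czasy procesory hPre
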